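-- pv_equiv track=rewrite | github.com/Nico-Posada/doglib | src/doglib/rand.py | _parse_bits
-- ===== SOURCE A (Python) =====
-- def _parse_bits(s):
--     if len(s) > 31:
--         raise ValueError(f"bit string too long (max 31 bits), got {len(s)}")
--     s = s.ljust(31, '?')
--     value = 0
--     mask = 0
--     for ch in s:
--         value <<= 1
--         mask <<= 1
--         if ch == '1':
--             value |= 1
--             mask |= 1
--         elif ch == '0':
--             mask |= 1
--         elif ch != '?':
--             raise ValueError(f"invalid character in bit string: {ch!r}")
--     return (value, mask)
-- ===== SOURCE B (Python) =====
-- def _parse_bits(s):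
--     if len(s) > 31:
--         raise ValueError(f"bit string too long (max 31 bits), got {len(s)}")
--     for ch in s:
--         if ch not in '01?':
--             raise ValueError(f"invalid character in bit string: {ch!r}")
--     value = int(''.join('1' if ch == '1' else '0' for ch in s).ljust(31, '0'), 2)
--     mask = int(''.join('0' if ch == '?' else '1' for ch in s).ljust(31, '0'), 2)
--     return (value, mask)
-- ===== Notes on version B (the rewrite author's own statement) =====
-- stated objective: idiomatic
-- what changed: Replaces the single per-character shift/or loop with two accumulators by a separate validation pass followed by two mapped binary strings (one bit set where the char is a one for the value, where it is not a question mark for the mask), each padded on the right to 31 and converted with int(.,2).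
import Mathlib
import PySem

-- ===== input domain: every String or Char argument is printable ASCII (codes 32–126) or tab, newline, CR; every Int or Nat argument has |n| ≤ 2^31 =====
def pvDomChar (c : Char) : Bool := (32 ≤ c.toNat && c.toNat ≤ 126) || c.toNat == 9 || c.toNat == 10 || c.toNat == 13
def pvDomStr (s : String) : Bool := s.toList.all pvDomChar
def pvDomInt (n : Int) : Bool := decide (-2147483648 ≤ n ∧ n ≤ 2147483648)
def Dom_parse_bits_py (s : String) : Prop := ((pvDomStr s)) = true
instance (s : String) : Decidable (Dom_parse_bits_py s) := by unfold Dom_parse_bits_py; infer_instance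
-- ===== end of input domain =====

-- B replaces A's single shift/or loop over two accumulators by a validation pass plus two
-- mapped, '0'-padded binary strings converted with int(.,2) (idiomatic decomposition; same cost).


-- ===== PORT A =====
-- one loop step of A: value <<= 1; mask <<= 1; then the branch chain.
-- '<<= 1' is '* 2' and '|= 1' on the (even, nonnegative) shifted value is '+ 1': exact here.
def pbStepA (vm : Int × Int) (ch : Char) : Int × Int :=
  let value := vm.1 * 2
  let mask := vm.2 * 2
  if ch = '1' then (value + 1, mask + 1)
  else if ch = '0' then (value, mask + 1)
  else (value, mask)  -- ch == '?' keeps both; Python raises on any other char (excluded by Pre_)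

def parse_bits_py (s : String) : Int × Int :=
  -- s = s.ljust(31, '?') : exact for len(s) ≤ 31 (the raising case len > 31 is outside Pre_)
  let padded := s.toList ++ List.replicate (31 - s.toList.length) '?'
  padded.foldl pbStepA (0, 0)

-- ===== PORT B =====
def pbValChar (c : Char) : Char := if c = '1' then '1' else '0'
def pbMaskChar (c : Char) : Char := if c = '?' then '0' else '1'
-- int(t, 2) for a string of '0'/'1' chars: exact on such strings (B only builds those)
def pbBin (l : List Char) : Int := l.foldl (fun acc c => acc * 2 + (if c = '1' then 1 else 0)) 0

def parse_bits_py_alt (s : String) : Int × Int :=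
  let l := s.toList
  let value := pbBin (l.map pbValChar ++ List.replicate (31 - l.length) '0')
  let mask := pbBin (l.map pbMaskChar ++ List.replicate (31 - l.length) '0')
  (value, mask)

-- ===== PRECONDITION & SPEC =====
-- Pre_ excludes exactly the inputs where A raises ValueError: length over 31 or a character other than zero, one, or question mark.
def Pre_parse_bits_py (s : String) : Prop :=
  s.toList.length ≤ 31 ∧ s.toList.all (fun c => c == '0' || c == '1' || c == '?') = true
instance (s : String) : Decidable (Pre_parse_bits_py s) := by unfold Pre_parse_bits_py; infer_instance

def pvWitness_parse_bits_py : String := "1?0"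

def Spec_parse_bits_py (s : String) (out : Int × Int) : Prop := out = parse_bits_py_alt s
instance (s : String) (out : Int × Int) : Decidable (Spec_parse_bits_py s out) := by unfold Spec_parse_bits_py; infer_instance

-- ===== CLAIM (what is proved, stated in full; the proofs are below) =====
def Claim_equal_parse_bits_py : Prop := ∀ (s : String), Dom_parse_bits_py s → Pre_parse_bits_py s → Spec_parse_bits_py s (parse_bits_py s)

-- ===== LEMMAS AND PROOFS =====

-- A's two-accumulator fold is the pair of B's single-bit folds, for the three admitted characters.
theorem pbStepA_split (l : List Char) (h : ∀ c ∈ l, c = '0' ∨ c = '1' ∨ c = '?') :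
    ∀ v m : Int, l.foldl pbStepA (v, m) =
      ((l.map pbValChar).foldl (fun acc c => acc * 2 + (if c = '1' then 1 else 0)) v,
       (l.map pbMaskChar).foldl (fun acc c => acc * 2 + (if c = '1' then 1 else 0)) m) := by
  induction l with
  | nil => intro v m; simp
  | cons c t ih =>
    intro v m
    have hc := h c (List.mem_cons_self ..)
    have ht : ∀ c ∈ t, c = '0' ∨ c = '1' ∨ c = '?' := fun x hx => h x (List.mem_cons_of_mem _ hx)
    rcases hc with hc | hc | hc <;>
      simp [hc, pbStepA, pbValChar, pbMaskChar, ih ht]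

-- ===== VERDICT (by name: the statement is the Claim_ definition above) =====
theorem parse_bits_py_spec : Claim_equal_parse_bits_py := by
  intro s _ hpre
  obtain ⟨_, hchars'⟩ := hpre
  have hchars : ∀ c ∈ s.toList, c = '0' ∨ c = '1' ∨ c = '?' := by
    intro c hc
    have := List.all_eq_true.mp hchars' c hc
    simpa [or_assoc] using this
  show parse_bits_py s = parse_bits_py_alt s
  unfold parse_bits_py parse_bits_py_alt pbBin
  have hall : ∀ c ∈ s.toList ++ List.replicate (31 - s.toList.length) '?',
      c = '0' ∨ c = '1' ∨ c = '?' := by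
    intro c hc
    rcases List.mem_append.mp hc with h | h
    · exact hchars c h
    · right; right; exact (List.eq_of_mem_replicate h)
  simpa [List.map_append, List.map_replicate, pbValChar, pbMaskChar] using
    pbStepA_split _ hall 0 0
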